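-- pv_equiv track=rewrite | github.com/logandweckerle/ubuyfirst-proxy | services/response_wrapper.py | parse_reasoning
-- ===== SOURCE A (Python) =====
-- def parse_reasoning(reasoning: str) -> dict:
--     """Parse structured reasoning string into component parts."""
--     parts = {"detection": "", "calc": "", "decision": "", "concerns": "", "profit": "", "raw": reasoning}
--
--     if "|" in reasoning:
--         sections = reasoning.split("|")
--         for section in sections:
--             section = section.strip()
--             upper = section.upper()
--             if upper.startswith("DETECTION:"):
--                 parts["detection"] = section[10:].strip()
--             elif upper.startswith("CALC:"):
--                 parts["calc"] = section[5:].strip()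
--             elif upper.startswith("DECISION:"):
--                 parts["decision"] = section[9:].strip()
--             elif upper.startswith("CONCERNS:"):
--                 parts["concerns"] = section[9:].strip()
--             elif upper.startswith("PROFIT:"):
--                 parts["profit"] = section[7:].strip()
--
--     return parts
-- ===== SOURCE B (Python) =====
-- def parse_reasoning(reasoning: str) -> dict:
--     """Parse structured reasoning string into component parts."""
--     parts = {"detection": "", "calc": "", "decision": "", "concerns": "", "profit": "", "raw": reasoning}
--
--     if "|" in reasoning:
--         found = {}
--         for section in reasoning.split("|"):
--             section = section.strip()
--             i = section.find(":")
--             if i != -1: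
--                 found[section[:i].upper()] = section[i + 1:].strip()
--         for key in ("detection", "calc", "decision", "concerns", "profit"):
--             parts[key] = found.get(key.upper(), "")
--
--     return parts
-- ===== Notes on version B (the rewrite author's own statement) =====
-- stated objective: simpler
-- what changed: B replaces A's chain of five hard-coded startswith-prefix tests by one generic pass that splits each section at its first colon into an uppercased label and a stripped value collected in a dict, then projects the five known labels out of that dict.
import Mathlib
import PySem

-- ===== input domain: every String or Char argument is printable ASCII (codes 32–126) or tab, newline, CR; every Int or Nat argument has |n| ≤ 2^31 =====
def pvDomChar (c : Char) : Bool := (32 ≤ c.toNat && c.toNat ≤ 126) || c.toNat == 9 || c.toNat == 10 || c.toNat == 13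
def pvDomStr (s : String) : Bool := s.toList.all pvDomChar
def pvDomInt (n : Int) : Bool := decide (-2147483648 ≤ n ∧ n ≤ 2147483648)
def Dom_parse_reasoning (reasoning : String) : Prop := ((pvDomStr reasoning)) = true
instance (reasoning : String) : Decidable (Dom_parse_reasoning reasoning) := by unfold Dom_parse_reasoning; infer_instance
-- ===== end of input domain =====

-- B replaces A's chain of five startswith-prefix tests by one generic "split at the first colon" pass into a
-- label→value dict, followed by a projection of the five known labels (objective: simpler decomposition).

-- ===== PORT A =====
-- A's loop body as a named helper (the Python loop body, verbatim).
def pvStepA (parts : PySem.Dict String String) (sec : String) : PySem.Dict String String :=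
  let s := PySem.Str.strip sec
  let u := PySem.Str.upper s
  if PySem.Str.startswith u "DETECTION:" then
    parts.insert "detection" (PySem.Str.strip (PySem.Str.slice s (some 10) none))
  else if PySem.Str.startswith u "CALC:" then
    parts.insert "calc" (PySem.Str.strip (PySem.Str.slice s (some 5) none))
  else if PySem.Str.startswith u "DECISION:" then
    parts.insert "decision" (PySem.Str.strip (PySem.Str.slice s (some 9) none))
  else if PySem.Str.startswith u "CONCERNS:" then
    parts.insert "concerns" (PySem.Str.strip (PySem.Str.slice s (some 9) none))
  else if PySem.Str.startswith u "PROFIT:" then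
    parts.insert "profit" (PySem.Str.strip (PySem.Str.slice s (some 7) none))
  else parts

def parse_reasoning (reasoning : String) : List (String × String) :=
  let parts : PySem.Dict String String :=
    PySem.Dict.ofList [("detection", ""), ("calc", ""), ("decision", ""), ("concerns", ""),
                       ("profit", ""), ("raw", reasoning)]
  let parts :=
    if PySem.Str.isIn "|" reasoning then
      -- reasoning.split("|"): the separator is the nonempty literal "|", so split? is always `some`
      ((PySem.Str.split? reasoning "|").getD []).foldl pvStepA parts
    else parts
  parts.items

-- ===== PORT B =====
-- B's loop body as a named helper (the Python loop body, verbatim).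
def pvStepB (found : PySem.Dict String String) (sec : String) : PySem.Dict String String :=
  let s := PySem.Str.strip sec
  let i := PySem.Str.find s ":"
  if i ≠ -1 then
    found.insert (PySem.Str.upper (PySem.Str.slice s none (some i)))
                 (PySem.Str.strip (PySem.Str.slice s (some (i + 1)) none))
  else found

def parse_reasoning_alt (reasoning : String) : List (String × String) :=
  if PySem.Str.isIn "|" reasoning then
    let found : PySem.Dict String String :=
      ((PySem.Str.split? reasoning "|").getD []).foldl pvStepB PySem.Dict.empty
    [("detection", found.getD "DETECTION" ""), ("calc", found.getD "CALC" ""),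
     ("decision", found.getD "DECISION" ""), ("concerns", found.getD "CONCERNS" ""),
     ("profit", found.getD "PROFIT" ""), ("raw", reasoning)]
  else
    [("detection", ""), ("calc", ""), ("decision", ""), ("concerns", ""),
     ("profit", ""), ("raw", reasoning)]

-- ===== PRECONDITION & SPEC =====
def Spec_parse_reasoning (reasoning : String) (out : List (String × String)) : Prop := out = parse_reasoning_alt reasoning
instance (reasoning : String) (out : List (String × String)) : Decidable (Spec_parse_reasoning reasoning out) := by unfold Spec_parse_reasoning; infer_instance

-- ===== CLAIM (what is proved, stated in full; the proofs are below) =====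
def Claim_equal_parse_reasoning : Prop := ∀ (reasoning : String), Dom_parse_reasoning reasoning → Spec_parse_reasoning reasoning (parse_reasoning reasoning)

-- ===== LEMMAS AND PROOFS =====

-- The coupling invariant between A's parts dict and B's found dict.
def pvRel (r : String) (d m : PySem.Dict String String) : Prop :=
  d.keys = ["detection", "calc", "decision", "concerns", "profit", "raw"] ∧
  d.getD "detection" "" = m.getD "DETECTION" "" ∧
  d.getD "calc" "" = m.getD "CALC" "" ∧
  d.getD "decision" "" = m.getD "DECISION" "" ∧
  d.getD "concerns" "" = m.getD "CONCERNS" "" ∧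
  d.getD "profit" "" = m.getD "PROFIT" "" ∧
  d.getD "raw" "" = r

theorem pvUpperChar_eq_colon {c : Char} (h : PySem.Chars.upperChar c = ':') : c = ':' := by
  unfold PySem.Chars.upperChar at h
  split_ifs at h with hl
  · exfalso
    unfold PySem.Chars.islower at hl
    simp only [Bool.and_eq_true, decide_eq_true_eq] at hl
    have h1 : (97:Nat) ≤ c.toNat := hl.1
    have h2 : c.toNat ≤ 122 := hl.2
    have hv : (Char.ofNat (c.toNat - 32)).toNat = c.toNat - 32 := by
      rw [Char.toNat_ofNat, if_pos]
      left; omega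
    rw [h] at hv
    have : (':').toNat = 58 := rfl
    omega
  · exact h

theorem pvColon_not_mem_upper {a : List Char} (ha : ':' ∉ a) : ':' ∉ PySem.Chars.upper a := by
  unfold PySem.Chars.upper
  intro hm
  obtain ⟨c, hc, he⟩ := List.mem_map.mp hm
  exact ha (pvUpperChar_eq_colon he ▸ hc)

theorem pvPrefix_label {L A B : List Char} (hL : ':' ∉ L) (hA : ':' ∉ A) :
    (L ++ [':']) <+: (A ++ ':' :: B) ↔ A = L := by
  induction L generalizing A with
  | nil =>
    cases A with
    | nil => simp
    | cons c t =>
      simp only [List.nil_append, List.cons_append]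
      constructor
      · intro h
        obtain ⟨h1, -⟩ := (List.cons_prefix_cons).mp h
        cases h1; simp at hA
      · intro h; exact absurd h (by simp)
  | cons x L' ih =>
    cases A with
    | nil =>
      simp only [List.cons_append, List.nil_append]
      constructor
      · intro h
        obtain ⟨h1, -⟩ := (List.cons_prefix_cons).mp h
        cases h1; simp at hL
      · intro h; exact absurd h (by simp)
    | cons c t =>
      simp only [List.cons_append, List.cons_prefix_cons, List.cons.injEq]
      have hL' : ':' ∉ L' := fun h => hL (List.mem_cons_of_mem _ h)
      have hA' : ':' ∉ t := fun h => hA (List.mem_cons_of_mem _ h)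
      rw [ih hL' hA']
      constructor
      · rintro ⟨h1, h2⟩; exact ⟨h1.symm, h2⟩
      · rintro ⟨h1, h2⟩; exact ⟨h1.symm, h2⟩

theorem pvFind_decomp {cs : List Char} {i : Int} (h : PySem.Chars.find cs [':'] = i) (h0 : 0 ≤ i) :
    ∃ a b, cs = a ++ ':' :: b ∧ ':' ∉ a ∧ (a.length : Int) = i := by
  obtain ⟨hp, hmin⟩ := PySem.Chars.find_spec (s := cs) (sub := [':']) (h ▸ h0)
  rw [h] at hp hmin
  set n := i.toNat with hn
  have hlt : n < cs.length := by
    by_contra hge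
    rw [List.drop_eq_nil_of_le (by omega)] at hp
    simp at hp
  have hdrop : cs.drop n = ':' :: cs.drop (n + 1) := by
    rw [List.drop_eq_getElem_cons hlt]
    have : cs[n] = ':' := by
      have := hp
      rw [List.drop_eq_getElem_cons hlt] at this
      exact ((List.cons_prefix_cons).mp this).1.symm
    rw [this]
  refine ⟨cs.take n, cs.drop (n + 1), ?_, ?_, by simp [hn]; omega⟩
  · conv_lhs => rw [← List.take_append_drop n cs]
    rw [hdrop]
  · intro hm
    obtain ⟨j, hj, hget⟩ := List.mem_iff_getElem.mp hm
    have hjn : j < n := by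
      have := hj; simp [List.length_take] at this; omega
    apply hmin j hjn
    rw [List.drop_eq_getElem_cons (by omega)]
    have : cs[j] = ':' := by
      rw [← hget]; rw [List.getElem_take]
    rw [this]
    exact ⟨_, rfl⟩


theorem pvNoColon_startswith {s : String} (hf : PySem.Str.find s ":" = -1) {P : String} (hP : ':' ∈ P.toList) :
    PySem.Str.startswith (PySem.Str.upper s) P = false := by
  rw [PySem.Str.find_eq] at hf
  have hcol : ':' ∉ s.toList := by
    intro hm
    obtain ⟨l1, l2, he⟩ := List.mem_iff_append.mp hm
    exact (PySem.Chars.find_eq_neg_one_iff s.toList [':']).mp hf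
      ⟨l1, l2, by simpa using he.symm⟩
  have hup : ':' ∉ PySem.Chars.upper s.toList := pvColon_not_mem_upper hcol
  rw [PySem.Str.startswith_eq]
  by_contra hbe
  rw [Bool.not_eq_false] at hbe
  have hpre := (PySem.Chars.startswith_iff _ _).mp hbe
  rw [PySem.Str.toList_upper] at hpre
  exact hup (hpre.subset hP)

theorem pvUpper_decomp {s : String} {a b : List Char} (hcs : s.toList = a ++ ':' :: b) :
    (PySem.Str.upper s).toList = PySem.Chars.upper a ++ ':' :: PySem.Chars.upper b := by
  rw [PySem.Str.toList_upper, hcs]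
  unfold PySem.Chars.upper
  simp
  rfl

theorem pvMatch {s : String} {a b : List Char} (hcs : s.toList = a ++ ':' :: b) (ha : ':' ∉ a)
    {LC L : String} (hsplit : LC.toList = L.toList ++ [':']) (hL : ':' ∉ L.toList) :
    PySem.Str.startswith (PySem.Str.upper s) LC = true ↔ PySem.Chars.upper a = L.toList := by
  rw [PySem.Str.startswith_eq, PySem.Chars.startswith_iff, pvUpper_decomp hcs, hsplit]
  exact pvPrefix_label hL (pvColon_not_mem_upper ha)

theorem pvVal {s : String} {a b : List Char} (hcs : s.toList = a ++ ':' :: b) {m : Int} (hm : m = (a.length : Int) + 1) :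
    (PySem.Str.strip (PySem.Str.slice s (some m) none)).toList = PySem.Chars.strip b := by
  rw [PySem.Str.toList_strip, PySem.Str.toList_slice]
  unfold PySem.Chars.slice
  rw [PySem.List.slice_from _ (by omega : (0:Int) ≤ m)]
  congr 1
  rw [hcs, show m.toNat = a.length + 1 by omega, show a ++ ':' :: b = (a ++ [':']) ++ b by simp]
  exact List.drop_left' (by simp)

theorem pvKeyB {s : String} {a b : List Char} (hcs : s.toList = a ++ ':' :: b) {i : Int} (hi : i = (a.length : Int)) :
    (PySem.Str.upper (PySem.Str.slice s none (some i))).toList = PySem.Chars.upper a := by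
  rw [PySem.Str.toList_upper]
  congr 1
  rw [PySem.Str.toList_slice]
  unfold PySem.Chars.slice
  rw [PySem.List.slice_to _ (by omega : (0:Int) ≤ i), hcs,
      show i.toNat = a.length by omega]
  exact List.take_left' rfl

theorem pvRel_insert (r : String) (d m : PySem.Dict String String)
    (hk : d.keys = ["detection", "calc", "decision", "concerns", "profit", "raw"])
    (h1 : d.getD "detection" "" = m.getD "DETECTION" "")
    (h2 : d.getD "calc" "" = m.getD "CALC" "")
    (h3 : d.getD "decision" "" = m.getD "DECISION" "")
    (h4 : d.getD "concerns" "" = m.getD "CONCERNS" "")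
    (h5 : d.getD "profit" "" = m.getD "PROFIT" "")
    (h6 : d.getD "raw" "" = r)
    (low UP : String) (V : String)
    (hpair : (low, UP) ∈ [("detection", "DETECTION"), ("calc", "CALC"), ("decision", "DECISION"),
                          ("concerns", "CONCERNS"), ("profit", "PROFIT")]) :
    pvRel r (d.insert low V) (m.insert UP V) := by
  have hcont : ∀ k ∈ ["detection", "calc", "decision", "concerns", "profit"], d.contains k = true := by
    intro k hkm
    rw [PySem.Dict.contains_eq_decide_mem_keys, hk]
    fin_cases hkm <;> decide
  fin_cases hpair <;>
    exact ⟨by rw [PySem.Dict.keys_insert_of_contains _ _ (hcont _ (by decide))]; exact hk,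
      by simp [PySem.Dict.getD_insert, h1],
      by simp [PySem.Dict.getD_insert, h2],
      by simp [PySem.Dict.getD_insert, h3],
      by simp [PySem.Dict.getD_insert, h4],
      by simp [PySem.Dict.getD_insert, h5],
      by simp [PySem.Dict.getD_insert, h6]⟩

theorem pvRel_insert_other (r : String) (d m : PySem.Dict String String)
    (hk : d.keys = ["detection", "calc", "decision", "concerns", "profit", "raw"])
    (h1 : d.getD "detection" "" = m.getD "DETECTION" "")
    (h2 : d.getD "calc" "" = m.getD "CALC" "")
    (h3 : d.getD "decision" "" = m.getD "DECISION" "")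
    (h4 : d.getD "concerns" "" = m.getD "CONCERNS" "")
    (h5 : d.getD "profit" "" = m.getD "PROFIT" "")
    (h6 : d.getD "raw" "" = r)
    (K V : String)
    (hK : ∀ UP ∈ (["DETECTION", "CALC", "DECISION", "CONCERNS", "PROFIT"] : List String), UP ≠ K) :
    pvRel r d (m.insert K V) :=
  ⟨hk,
   by rw [PySem.Dict.getD_insert_of_ne _ _ _ (hK _ (by decide))]; exact h1,
   by rw [PySem.Dict.getD_insert_of_ne _ _ _ (hK _ (by decide))]; exact h2,
   by rw [PySem.Dict.getD_insert_of_ne _ _ _ (hK _ (by decide))]; exact h3,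
   by rw [PySem.Dict.getD_insert_of_ne _ _ _ (hK _ (by decide))]; exact h4,
   by rw [PySem.Dict.getD_insert_of_ne _ _ _ (hK _ (by decide))]; exact h5,
   h6⟩

theorem pvStep_rel (r sec : String) (d m : PySem.Dict String String) (h : pvRel r d m) :
    pvRel r (pvStepA d sec) (pvStepB m sec) := by
  obtain ⟨hk, h1, h2, h3, h4, h5, h6⟩ := h
  unfold pvStepA pvStepB
  dsimp only
  by_cases hf : PySem.Str.find (PySem.Str.strip sec) ":" = -1
  · rw [pvNoColon_startswith hf (by decide), pvNoColon_startswith hf (by decide),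
        pvNoColon_startswith hf (by decide), pvNoColon_startswith hf (by decide),
        pvNoColon_startswith hf (by decide)]
    simp only [hf, Bool.false_eq_true, if_false, ne_eq, not_true_eq_false]
    exact ⟨hk, h1, h2, h3, h4, h5, h6⟩
  · -- a colon is present: decompose the stripped section at its first colon
    have hfc : PySem.Chars.find (PySem.Str.strip sec).toList [':'] =
        PySem.Str.find (PySem.Str.strip sec) ":" := (PySem.Str.find_eq (PySem.Str.strip sec) ":").symm
    have h0 : (0:Int) ≤ PySem.Str.find (PySem.Str.strip sec) ":" := by
      have hge := PySem.Chars.neg_one_le_find (PySem.Str.strip sec).toList [':']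
      rw [hfc] at hge
      omega
    obtain ⟨a, b, hcs, ha, hlen⟩ := pvFind_decomp hfc h0
    rw [if_pos hf]
    have hKB : (PySem.Str.upper (PySem.Str.slice (PySem.Str.strip sec) none
        (some (PySem.Str.find (PySem.Str.strip sec) ":")))).toList = PySem.Chars.upper a :=
      pvKeyB hcs hlen.symm
    have hVB : (PySem.Str.strip (PySem.Str.slice (PySem.Str.strip sec)
        (some (PySem.Str.find (PySem.Str.strip sec) ":" + 1)))).toList = PySem.Chars.strip b :=
      pvVal hcs (by omega)
    by_cases hd1 : PySem.Chars.upper a = "DETECTION".toList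
    · have hb1 : PySem.Str.startswith (PySem.Str.upper (PySem.Str.strip sec)) "DETECTION:" = true :=
        (pvMatch hcs ha rfl (by decide)).mpr hd1
      rw [if_pos hb1]
      have hla : a.length = 9 := by
        have hlc := congrArg List.length hd1
        simpa [PySem.Chars.upper] using hlc
      have hVA : (PySem.Str.strip (PySem.Str.slice (PySem.Str.strip sec) (some 10))).toList
          = PySem.Chars.strip b := pvVal hcs (by omega)
      have hKB' : PySem.Str.upper (PySem.Str.slice (PySem.Str.strip sec) none
          (some (PySem.Str.find (PySem.Str.strip sec) ":"))) = "DETECTION" :=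
        String.toList_inj.mp (hKB.trans hd1)
      have hVeq : PySem.Str.strip (PySem.Str.slice (PySem.Str.strip sec)
          (some (PySem.Str.find (PySem.Str.strip sec) ":" + 1)))
          = PySem.Str.strip (PySem.Str.slice (PySem.Str.strip sec) (some 10)) :=
        String.toList_inj.mp (hVB.trans hVA.symm)
      rw [hKB', hVeq]
      exact pvRel_insert r d m hk h1 h2 h3 h4 h5 h6 _ _ _ (by decide)
    · have hb1 : PySem.Str.startswith (PySem.Str.upper (PySem.Str.strip sec)) "DETECTION:" = false := by
        rw [Bool.eq_false_iff]
        exact fun hx => hd1 ((pvMatch hcs ha rfl (by decide)).mp hx)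
      rw [hb1]
      simp only [Bool.false_eq_true, if_false]
      by_cases hd2 : PySem.Chars.upper a = "CALC".toList
      · have hb2 : PySem.Str.startswith (PySem.Str.upper (PySem.Str.strip sec)) "CALC:" = true :=
          (pvMatch hcs ha rfl (by decide)).mpr hd2
        rw [if_pos hb2]
        have hla : a.length = 4 := by
          have hlc := congrArg List.length hd2
          simpa [PySem.Chars.upper] using hlc
        have hVA : (PySem.Str.strip (PySem.Str.slice (PySem.Str.strip sec) (some 5))).toList
            = PySem.Chars.strip b := pvVal hcs (by omega)
        have hKB' : PySem.Str.upper (PySem.Str.slice (PySem.Str.strip sec) none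
            (some (PySem.Str.find (PySem.Str.strip sec) ":"))) = "CALC" :=
          String.toList_inj.mp (hKB.trans hd2)
        have hVeq : PySem.Str.strip (PySem.Str.slice (PySem.Str.strip sec)
            (some (PySem.Str.find (PySem.Str.strip sec) ":" + 1)))
            = PySem.Str.strip (PySem.Str.slice (PySem.Str.strip sec) (some 5)) :=
          String.toList_inj.mp (hVB.trans hVA.symm)
        rw [hKB', hVeq]
        exact pvRel_insert r d m hk h1 h2 h3 h4 h5 h6 _ _ _ (by decide)
      · have hb2 : PySem.Str.startswith (PySem.Str.upper (PySem.Str.strip sec)) "CALC:" = false := by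
          rw [Bool.eq_false_iff]
          exact fun hx => hd2 ((pvMatch hcs ha rfl (by decide)).mp hx)
        rw [hb2]
        simp only [Bool.false_eq_true, if_false]
        by_cases hd3 : PySem.Chars.upper a = "DECISION".toList
        · have hb3 : PySem.Str.startswith (PySem.Str.upper (PySem.Str.strip sec)) "DECISION:" = true :=
            (pvMatch hcs ha rfl (by decide)).mpr hd3
          rw [if_pos hb3]
          have hla : a.length = 8 := by
            have hlc := congrArg List.length hd3
            simpa [PySem.Chars.upper] using hlc
          have hVA : (PySem.Str.strip (PySem.Str.slice (PySem.Str.strip sec) (some 9))).toList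
              = PySem.Chars.strip b := pvVal hcs (by omega)
          have hKB' : PySem.Str.upper (PySem.Str.slice (PySem.Str.strip sec) none
              (some (PySem.Str.find (PySem.Str.strip sec) ":"))) = "DECISION" :=
            String.toList_inj.mp (hKB.trans hd3)
          have hVeq : PySem.Str.strip (PySem.Str.slice (PySem.Str.strip sec)
              (some (PySem.Str.find (PySem.Str.strip sec) ":" + 1)))
              = PySem.Str.strip (PySem.Str.slice (PySem.Str.strip sec) (some 9)) :=
            String.toList_inj.mp (hVB.trans hVA.symm)
          rw [hKB', hVeq]
          exact pvRel_insert r d m hk h1 h2 h3 h4 h5 h6 _ _ _ (by decide)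
        · have hb3 : PySem.Str.startswith (PySem.Str.upper (PySem.Str.strip sec)) "DECISION:" = false := by
            rw [Bool.eq_false_iff]
            exact fun hx => hd3 ((pvMatch hcs ha rfl (by decide)).mp hx)
          rw [hb3]
          simp only [Bool.false_eq_true, if_false]
          by_cases hd4 : PySem.Chars.upper a = "CONCERNS".toList
          · have hb4 : PySem.Str.startswith (PySem.Str.upper (PySem.Str.strip sec)) "CONCERNS:" = true :=
              (pvMatch hcs ha rfl (by decide)).mpr hd4
            rw [if_pos hb4]
            have hla : a.length = 8 := by
              have hlc := congrArg List.length hd4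
              simpa [PySem.Chars.upper] using hlc
            have hVA : (PySem.Str.strip (PySem.Str.slice (PySem.Str.strip sec) (some 9))).toList
                = PySem.Chars.strip b := pvVal hcs (by omega)
            have hKB' : PySem.Str.upper (PySem.Str.slice (PySem.Str.strip sec) none
                (some (PySem.Str.find (PySem.Str.strip sec) ":"))) = "CONCERNS" :=
              String.toList_inj.mp (hKB.trans hd4)
            have hVeq : PySem.Str.strip (PySem.Str.slice (PySem.Str.strip sec)
                (some (PySem.Str.find (PySem.Str.strip sec) ":" + 1)))
                = PySem.Str.strip (PySem.Str.slice (PySem.Str.strip sec) (some 9)) :=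
              String.toList_inj.mp (hVB.trans hVA.symm)
            rw [hKB', hVeq]
            exact pvRel_insert r d m hk h1 h2 h3 h4 h5 h6 _ _ _ (by decide)
          · have hb4 : PySem.Str.startswith (PySem.Str.upper (PySem.Str.strip sec)) "CONCERNS:" = false := by
              rw [Bool.eq_false_iff]
              exact fun hx => hd4 ((pvMatch hcs ha rfl (by decide)).mp hx)
            rw [hb4]
            simp only [Bool.false_eq_true, if_false]
            by_cases hd5 : PySem.Chars.upper a = "PROFIT".toList
            · have hb5 : PySem.Str.startswith (PySem.Str.upper (PySem.Str.strip sec)) "PROFIT:" = true :=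
                (pvMatch hcs ha rfl (by decide)).mpr hd5
              rw [if_pos hb5]
              have hla : a.length = 6 := by
                have hlc := congrArg List.length hd5
                simpa [PySem.Chars.upper] using hlc
              have hVA : (PySem.Str.strip (PySem.Str.slice (PySem.Str.strip sec) (some 7))).toList
                  = PySem.Chars.strip b := pvVal hcs (by omega)
              have hKB' : PySem.Str.upper (PySem.Str.slice (PySem.Str.strip sec) none
                  (some (PySem.Str.find (PySem.Str.strip sec) ":"))) = "PROFIT" :=
                String.toList_inj.mp (hKB.trans hd5)
              have hVeq : PySem.Str.strip (PySem.Str.slice (PySem.Str.strip sec)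
                  (some (PySem.Str.find (PySem.Str.strip sec) ":" + 1)))
                  = PySem.Str.strip (PySem.Str.slice (PySem.Str.strip sec) (some 7)) :=
                String.toList_inj.mp (hVB.trans hVA.symm)
              rw [hKB', hVeq]
              exact pvRel_insert r d m hk h1 h2 h3 h4 h5 h6 _ _ _ (by decide)
            · have hb5 : PySem.Str.startswith (PySem.Str.upper (PySem.Str.strip sec)) "PROFIT:" = false := by
                rw [Bool.eq_false_iff]
                exact fun hx => hd5 ((pvMatch hcs ha rfl (by decide)).mp hx)
              rw [hb5]
              simp only [Bool.false_eq_true, if_false]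
              refine pvRel_insert_other r d m hk h1 h2 h3 h4 h5 h6 _ _ ?_
              intro UP hUP he
              rw [← he] at hKB
              fin_cases hUP
              · exact hd1 hKB.symm
              · exact hd2 hKB.symm
              · exact hd3 hKB.symm
              · exact hd4 hKB.symm
              · exact hd5 hKB.symm

theorem pvFold_rel (r : String) (l : List String) (d m : PySem.Dict String String) (h : pvRel r d m) :
    pvRel r (l.foldl pvStepA d) (l.foldl pvStepB m) := by
  induction l generalizing d m with
  | nil => simpa using h
  | cons x xs ih =>
    rw [List.foldl_cons, List.foldl_cons]
    exact ih _ _ (pvStep_rel r x d m h)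


-- ===== VERDICT (by name: the statement is the Claim_ definition above) =====
theorem parse_reasoning_spec : Claim_equal_parse_reasoning := by
  intro reasoning _
  unfold Spec_parse_reasoning parse_reasoning parse_reasoning_alt
  dsimp only
  by_cases hb : PySem.Str.isIn "|" reasoning = true
  · rw [if_pos hb, if_pos hb]
    have hinit : pvRel reasoning
        (PySem.Dict.ofList [("detection", ""), ("calc", ""), ("decision", ""), ("concerns", ""),
          ("profit", ""), ("raw", reasoning)]) PySem.Dict.empty :=
      ⟨rfl, rfl, rfl, rfl, rfl, rfl, rfl⟩
    obtain ⟨hk, h1, h2, h3, h4, h5, h6⟩ :=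
      pvFold_rel reasoning ((PySem.Str.split? reasoning "|").getD []) _ _ hinit
    rw [PySem.Dict.items_eq_map_keys _ (by rw [hk]; decide) "", hk]
    simp only [List.map_cons, List.map_nil]
    rw [h1, h2, h3, h4, h5, h6]
  · rw [if_neg hb, if_neg hb]
    rfl
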